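-- pv_equiv track=rewrite | github.com/ecbush/xenoGI | xenoGI/Family.py | __costSum__
-- ===== SOURCE A (Python) =====
-- def __costSum__(mprNodeFormatD,D,T,L,O,R):
--     '''Sum the costs implied by the recon in mprNodeFormatD.'''
--     sm = 0
--     for valL in mprNodeFormatD.values():
--         for eventType,_,_,_ in valL:
--             if eventType == 'D':
--                 sm+=D
--             elif eventType == 'T':
--                 sm+=T
--             elif eventType == 'L':
--                 sm+=L
--             elif eventType == 'O':
--                 sm+=O
--             elif eventType == 'R':
--                 sm+=R
--             # S events have no cost
--     return sm
-- ===== SOURCE B (Python) =====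
-- def __costSum__(mprNodeFormatD, D, T, L, O, R):
--     '''Sum the costs implied by the recon in mprNodeFormatD.'''
--     types = [ev[0] for valL in mprNodeFormatD.values() for ev in valL]
--     return sum(types.count(t) * c
--                for t, c in (('D', D), ('T', T), ('L', L), ('O', O), ('R', R)))
-- ===== Notes on version B (the rewrite author's own statement) =====
-- stated objective: idiomatic
-- what changed: B replaces A's per-event running accumulator with a tabulate-then-combine structure: it flattens all events into a list of event types, then computes count(t)*cost once per cost category.
import Mathlib
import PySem

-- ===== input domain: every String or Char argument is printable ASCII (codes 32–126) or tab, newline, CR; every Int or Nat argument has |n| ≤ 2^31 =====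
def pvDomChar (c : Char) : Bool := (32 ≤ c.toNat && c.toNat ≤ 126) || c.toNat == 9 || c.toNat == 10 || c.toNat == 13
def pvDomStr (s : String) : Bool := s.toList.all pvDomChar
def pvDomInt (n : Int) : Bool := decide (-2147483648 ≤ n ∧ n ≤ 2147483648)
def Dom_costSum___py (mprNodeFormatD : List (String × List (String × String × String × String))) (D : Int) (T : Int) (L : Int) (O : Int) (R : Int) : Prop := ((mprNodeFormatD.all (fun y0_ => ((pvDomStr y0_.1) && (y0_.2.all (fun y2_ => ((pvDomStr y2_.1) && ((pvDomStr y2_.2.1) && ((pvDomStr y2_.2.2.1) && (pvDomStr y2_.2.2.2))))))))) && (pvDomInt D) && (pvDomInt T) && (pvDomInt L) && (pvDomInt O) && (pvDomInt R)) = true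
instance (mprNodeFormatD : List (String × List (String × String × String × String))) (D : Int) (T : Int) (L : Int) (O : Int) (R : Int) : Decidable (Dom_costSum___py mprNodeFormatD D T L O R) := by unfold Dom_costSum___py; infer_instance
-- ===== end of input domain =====

-- B replaces A's per-event running accumulator with a tabulate-then-combine pass (flatten event types, then count(t)*cost per category) — an idiomatic restructuring, same cost.


-- ===== PORT A =====
-- literal transliteration of A: running scalar accumulator over dict values and events
def costSum___py (mprNodeFormatD : List (String × List (String × String × String × String))) (D : Int) (T : Int) (L : Int) (O : Int) (R : Int) : Int :=
  mprNodeFormatD.foldl (fun sm kv =>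
    kv.2.foldl (fun sm ev =>
      if ev.1 == "D" then sm + D
      else if ev.1 == "T" then sm + T
      else if ev.1 == "L" then sm + L
      else if ev.1 == "O" then sm + O
      else if ev.1 == "R" then sm + R
      else sm) sm) 0

-- ===== PORT B =====
-- transliteration of B: flatten event types, then count(t)*cost per category
def costSum___py_alt (mprNodeFormatD : List (String × List (String × String × String × String))) (D : Int) (T : Int) (L : Int) (O : Int) (R : Int) : Int :=
  let types := (mprNodeFormatD.flatMap (fun kv => kv.2)).map (fun ev => ev.1)
  ([("D", D), ("T", T), ("L", L), ("O", O), ("R", R)].map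
    (fun tc => ((PySem.List.count types tc.1 : Int)) * tc.2)).sum

-- ===== PRECONDITION & SPEC =====
def Spec_costSum___py (mprNodeFormatD : List (String × List (String × String × String × String))) (D : Int) (T : Int) (L : Int) (O : Int) (R : Int) (out : Int) : Prop := out = costSum___py_alt mprNodeFormatD D T L O R
instance (mprNodeFormatD : List (String × List (String × String × String × String))) (D : Int) (T : Int) (L : Int) (O : Int) (R : Int) (out : Int) : Decidable (Spec_costSum___py mprNodeFormatD D T L O R out) := by unfold Spec_costSum___py; infer_instance

-- ===== CLAIM (what is proved, stated in full; the proofs are below) =====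
def Claim_equal_costSum___py : Prop := ∀ (mprNodeFormatD : List (String × List (String × String × String × String))) (D : Int) (T : Int) (L : Int) (O : Int) (R : Int), Dom_costSum___py mprNodeFormatD D T L O R → Spec_costSum___py mprNodeFormatD D T L O R (costSum___py mprNodeFormatD D T L O R)

-- ===== LEMMAS AND PROOFS =====

-- ===== VERDICT (by name: the statement is the Claim_ definition above) =====

-- cost of one event type
def pvCost (t : String) (D T L O R : Int) : Int :=
  if t == "D" then D else if t == "T" then T else if t == "L" then L
  else if t == "O" then O else if t == "R" then R else 0

theorem pvInner (evs : List (String × String × String × String)) (D T L O R sm : Int) :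
    evs.foldl (fun sm ev =>
      if ev.1 == "D" then sm + D
      else if ev.1 == "T" then sm + T
      else if ev.1 == "L" then sm + L
      else if ev.1 == "O" then sm + O
      else if ev.1 == "R" then sm + R
      else sm) sm = sm + ((evs.map (fun ev => pvCost ev.1 D T L O R)).sum) := by
  induction evs generalizing sm with
  | nil => simp
  | cons e es ih =>
    simp only [List.foldl_cons, List.map_cons, List.sum_cons, ih]
    unfold pvCost
    split_ifs <;> ring

theorem pvOuter (d : List (String × List (String × String × String × String)))
    (D T L O R sm : Int) :
    d.foldl (fun sm kv =>
      kv.2.foldl (fun sm ev =>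
        if ev.1 == "D" then sm + D
        else if ev.1 == "T" then sm + T
        else if ev.1 == "L" then sm + L
        else if ev.1 == "O" then sm + O
        else if ev.1 == "R" then sm + R
        else sm) sm) sm
    = sm + ((d.flatMap (fun kv => kv.2)).map (fun ev => pvCost ev.1 D T L O R)).sum := by
  induction d generalizing sm with
  | nil => simp
  | cons kv rest ih =>
    rw [List.foldl_cons, pvInner, ih, List.flatMap_cons, List.map_append, List.sum_append]
    ring

theorem pvCombo (ts : List String) (D T L O R : Int) :
    (([("D", D), ("T", T), ("L", L), ("O", O), ("R", R)] :
        List (String × Int)).map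
      (fun tc => ((PySem.List.count ts tc.1 : Int)) * tc.2)).sum
    = (ts.map (fun t => pvCost t D T L O R)).sum := by
  induction ts with
  | nil => simp [PySem.List.count]
  | cons t ts ih =>
    simp only [List.map_cons, List.sum_cons, PySem.List.count_eq] at *
    rw [← ih]
    clear ih
    simp only [List.count_cons, pvCost]
    by_cases h1 : t = "D" <;> by_cases h2 : t = "T" <;> by_cases h3 : t = "L" <;>
      by_cases h4 : t = "O" <;> by_cases h5 : t = "R" <;>
      simp [h1, h2, h3, h4, h5] <;> push_cast <;> ring

theorem costSum___py_spec : Claim_equal_costSum___py := by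
  intro mprNodeFormatD D T L O R _
  unfold Spec_costSum___py costSum___py costSum___py_alt
  rw [pvCombo, List.map_map, pvOuter, Int.zero_add]
  rfl
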